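-- pv_equiv track=rewrite | github.com/PyTorchLightning/metrics | torchmetrics/functional/text/meteor.py | _match_enums
-- ===== SOURCE A (Python) =====
-- from typing import Any, Dict, List, Set,Tuple, Union
--
-- def _match_enums(
--     enum_reference: List[Tuple[int, str]], enum_hypothesis: List[Tuple[int, str]]
-- ) -> Tuple[List[Tuple[int, int]], List[Tuple[int, str]], List[Tuple[int, str]]]:
--     """
--     Args:
--         enum_reference: an enumerated list of a tokenized reference
--         enum_hypothesis: an enumerated list of a tokenized hypothessis
--
--     Return:
--         tuple of lists:
--             an enumerated list of matched words
--             an enumerated list of unmatched reference words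
--             an enumerated list of unmatched hypothesis words
--     """
--     word_match = []
--     for i in range(len(enum_hypothesis))[::-1]:
--         for j in range(len(enum_reference))[::-1]:
--             if enum_hypothesis[i][1] == enum_reference[j][1]:
--                 word_match.append((enum_reference[j][0], enum_hypothesis[i][0]))
--                 enum_hypothesis.pop(i)
--                 enum_reference.pop(j)
--                 break
--     return word_match, enum_reference, enum_hypothesis
-- ===== SOURCE B (Python) =====
-- def _match_enums(enum_reference, enum_hypothesis):
--     # One pass over the reference builds per-word stacks of (index, id); each
--     # hypothesis word (scanned right-to-left) pops its word's largest remaining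
--     # reference index in O(1), instead of rescanning the whole reference list.
--     # Mutates both argument lists in place to the unmatched remainders, like A.
--     positions = {}
--     for j, (rid, word) in enumerate(enum_reference):
--         positions.setdefault(word, []).append((j, rid))
--     word_match = []
--     matched = set()
--     kept_hyp = []
--     for i in range(len(enum_hypothesis) - 1, -1, -1):
--         hid, word = enum_hypothesis[i]
--         stack = positions.get(word)
--         if stack:
--             j, rid = stack.pop()
--             matched.add(j)
--             word_match.append((rid, hid))
--         else:
--             kept_hyp.append(enum_hypothesis[i])
--     kept_hyp.reverse()
--     kept_ref = [p for j, p in enumerate(enum_reference) if j not in matched]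
--     enum_reference[:] = kept_ref
--     enum_hypothesis[:] = kept_hyp
--     return word_match, enum_reference, enum_hypothesis
-- ===== Notes on version B (the rewrite author's own statement) =====
-- stated objective: faster
-- what changed: Replaces A's quadratic rescan of the whole reference list for every hypothesis word by a dict of per-word stacks of reference positions built in one pass, so each hypothesis word pops its largest remaining reference index in O(1); unmatched lists are rebuilt by filtering instead of repeated list.pop.
import Mathlib
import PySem

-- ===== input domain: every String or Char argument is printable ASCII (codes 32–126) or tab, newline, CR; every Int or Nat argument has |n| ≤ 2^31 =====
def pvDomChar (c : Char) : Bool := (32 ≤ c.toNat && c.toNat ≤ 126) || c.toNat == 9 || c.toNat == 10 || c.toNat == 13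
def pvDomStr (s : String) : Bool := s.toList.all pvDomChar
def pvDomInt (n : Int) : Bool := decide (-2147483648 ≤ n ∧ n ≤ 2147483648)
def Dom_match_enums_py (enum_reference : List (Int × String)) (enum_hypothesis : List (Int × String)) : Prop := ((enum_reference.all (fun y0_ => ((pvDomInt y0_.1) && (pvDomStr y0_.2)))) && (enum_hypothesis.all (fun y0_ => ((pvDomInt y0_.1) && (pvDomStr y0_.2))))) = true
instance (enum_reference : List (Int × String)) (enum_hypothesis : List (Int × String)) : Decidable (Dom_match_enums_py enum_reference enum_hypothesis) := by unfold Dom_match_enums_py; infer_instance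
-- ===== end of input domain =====

-- B replaces A's inner rescan of the whole reference list for every hypothesis word by
-- per-word stacks of reference positions built once in a dict; both Pythons mutate their
-- argument lists in place identically — the equivalence proved here is about the return value.


-- ===== PORT A =====
-- A's inner loop: j from k-1 down to 0, first j with enum_reference[j][1] == w
def pvInnerA (w : String) (ref : List (Int × String)) : Nat → Option Nat
  | 0 => none
  | j+1 =>
    match ref[j]? with
    | some p => if p.2 = w then some j else pvInnerA w ref j
    | none => pvInnerA w ref j

-- A's outer loop: i from len(hyp)-1 down to 0; on a match pops from both lists
def pvAGo (ref hyp : List (Int × String)) (wm : List (Int × Int)) :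
    Nat → (List (Int × Int)) × (List (Int × String)) × (List (Int × String))
  | 0 => (wm, ref, hyp)
  | i+1 =>
    match hyp[i]? with
    | none => pvAGo ref hyp wm i
    | some h =>
      match pvInnerA h.2 ref ref.length with
      | none => pvAGo ref hyp wm i
      | some j =>
        match ref[j]? with
        | none => pvAGo ref hyp wm i
        | some r => pvAGo (ref.eraseIdx j) (hyp.eraseIdx i) (wm ++ [(r.1, h.1)]) i

def match_enums_py (enum_reference : List (Int × String)) (enum_hypothesis : List (Int × String)) : (List (Int × Int)) × (List (Int × String)) × (List (Int × String)) :=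
  pvAGo enum_reference enum_hypothesis [] enum_hypothesis.length

-- ===== PORT B =====
-- positions.setdefault(word, []).append((j, rid)) over enumerate(enum_reference)
def pvBuildPos : List (Int × String) → Nat → PySem.Dict String (List (Nat × Int)) → PySem.Dict String (List (Nat × Int))
  | [], _, d => d
  | p :: t, j, d => pvBuildPos t (j+1) (d.insert p.2 (d.getD p.2 [] ++ [(j, p.1)]))

-- [p for j, p in enumerate(enum_reference) if j not in matched]
def pvKeptRef : List (Int × String) → Nat → PySem.Set Nat → List (Int × String)
  | [], _, _ => []
  | p :: t, j, m => (if j ∈ m then [] else [p]) ++ pvKeptRef t (j+1) m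

-- B's loop: i from len(hyp)-1 down to 0; stack.pop() / matched.add(j) / kept_hyp.append
def pvBGo (hyp : List (Int × String)) :
    Nat → PySem.Dict String (List (Nat × Int)) → PySem.Set Nat → List (Int × Int) → List (Int × String) →
    (PySem.Set Nat) × (List (Int × Int)) × (List (Int × String))
  | 0, _, m, wm, kept => (m, wm, kept)
  | i+1, pos, m, wm, kept =>
    match hyp[i]? with
    | none => pvBGo hyp i pos m wm kept
    | some h =>
      match pos.getD h.2 [] with
      | [] => pvBGo hyp i pos m wm (kept ++ [h])
      | q :: qs =>
        let top := (q :: qs).getLast (by simp)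
        pvBGo hyp i (pos.insert h.2 (q :: qs).dropLast) (PySem.Set.add m top.1) (wm ++ [(top.2, h.1)]) kept

def match_enums_py_alt (enum_reference : List (Int × String)) (enum_hypothesis : List (Int × String)) : (List (Int × Int)) × (List (Int × String)) × (List (Int × String)) :=
  let pos := pvBuildPos enum_reference 0 PySem.Dict.empty
  let r := pvBGo enum_hypothesis enum_hypothesis.length pos PySem.Set.empty [] []
  (r.2.1, pvKeptRef enum_reference 0 r.1, r.2.2.reverse)

-- ===== PRECONDITION & SPEC =====
def Spec_match_enums_py (enum_reference : List (Int × String)) (enum_hypothesis : List (Int × String)) (out : (List (Int × Int)) × (List (Int × String)) × (List (Int × String))) : Prop := out = match_enums_py_alt enum_reference enum_hypothesis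
instance (enum_reference : List (Int × String)) (enum_hypothesis : List (Int × String)) (out : (List (Int × Int)) × (List (Int × String)) × (List (Int × String))) : Decidable (Spec_match_enums_py enum_reference enum_hypothesis out) := by unfold Spec_match_enums_py; infer_instance

-- ===== CLAIM (what is proved, stated in full; the proofs are below) =====
def Claim_equal_match_enums_py : Prop := ∀ (enum_reference : List (Int × String)) (enum_hypothesis : List (Int × String)), Dom_match_enums_py enum_reference enum_hypothesis → Spec_match_enums_py enum_reference enum_hypothesis (match_enums_py enum_reference enum_hypothesis)

-- ===== LEMMAS AND PROOFS =====

-- Abstract step both programs implement: remove the LAST element of ref whose word is w.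
def pvRLM (w : String) : List (Int × String) → Option (Int × List (Int × String))
  | [] => none
  | p :: t =>
    match pvRLM w t with
    | some (id, t') => some (id, p :: t')
    | none => if p.2 = w then some (p.1, t) else none

-- Common recursion both loops are reduced to: hypothesis words back to front via pvRLM.
def pvSpecGo : List (Int × String) → List (Int × String) →
    (List (Int × Int)) × (List (Int × String)) × (List (Int × String))
  | ref, [] => ([], ref, [])
  | ref, h :: t =>
    match pvRLM h.2 ref with
    | some x => let r := pvSpecGo x.2 t; ((x.1, h.1) :: r.1, r.2.1, r.2.2)
    | none => let r := pvSpecGo ref t; (r.1, r.2.1, h :: r.2.2)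

-- (index, id) pairs of still-unmatched occurrences of w in l, ascending from index j.
def pvPosPairs (w : String) : List (Int × String) → Nat → PySem.Set Nat → List (Nat × Int)
  | [], _, _ => []
  | p :: t, j, m => (if j ∉ m ∧ p.2 = w then [(j, p.1)] else []) ++ pvPosPairs w t (j+1) m

-- ---- A's loops compute pvSpecGo ----
theorem pvInnerA_some {w : String} {ref : List (Int × String)} {k j : Nat}
    (h : pvInnerA w ref k = some j) : j < k ∧ ∃ p, ref[j]? = some p ∧ p.2 = w := by
  induction k with
  | zero => simp [pvInnerA] at h
  | succ k ih =>
    rw [pvInnerA] at h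
    cases hg : ref[k]? with
    | none => rw [hg] at h; exact ⟨Nat.lt_succ_of_lt (ih h).1, (ih h).2⟩
    | some p =>
      rw [hg] at h
      by_cases hp : p.2 = w
      · simp [hp] at h; subst h; exact ⟨Nat.lt_succ_self _, p, hg, hp⟩
      · simp [hp] at h; exact ⟨Nat.lt_succ_of_lt (ih h).1, (ih h).2⟩

theorem pvInnerA_append {w : String} (r : List (Int × String)) (p : Int × String)
    {k : Nat} (hk : k ≤ r.length) : pvInnerA w (r ++ [p]) k = pvInnerA w r k := by
  induction k with
  | zero => rfl
  | succ k ih =>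
    rw [pvInnerA, pvInnerA, List.getElem?_append_left (by omega), ih (by omega)]

theorem pvRLM_snoc (w : String) (r : List (Int × String)) (p : Int × String) :
    pvRLM w (r ++ [p]) =
      if p.2 = w then some (p.1, r)
      else Option.map (fun x => (x.1, x.2 ++ [p])) (pvRLM w r) := by
  induction r with
  | nil => simp [pvRLM]
  | cons a t ih =>
    simp only [List.cons_append, pvRLM, ih]
    by_cases hp : p.2 = w
    · simp [hp]
    · simp only [hp, if_false]
      cases hr : pvRLM w t with
      | none => simp
      | some x => simp

theorem pvInnerA_rLM (w : String) (r : List (Int × String)) :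
    pvRLM w r =
      match pvInnerA w r r.length with
      | none => none
      | some j =>
        match r[j]? with
        | none => none
        | some p => some (p.1, r.eraseIdx j) := by
  induction r using List.reverseRecOn with
  | nil => rfl
  | append_singleton r p ih =>
    rw [pvRLM_snoc]
    have hlen : (r ++ [p]).length = r.length + 1 := by simp
    rw [hlen, pvInnerA, List.getElem?_append_right (le_refl _)]
    simp only [Nat.sub_self, List.getElem?_cons_zero]
    by_cases hp : p.2 = w
    · simp only [hp, if_true]
      rw [List.getElem?_append_right (le_refl _)]
      simp [List.eraseIdx_append_of_length_le (le_refl r.length)]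
    · simp only [hp, if_false]
      rw [pvInnerA_append r p (le_refl _), ih]
      cases hi : pvInnerA w r r.length with
      | none => simp
      | some j =>
        obtain ⟨hj, q, hq, hqw⟩ := pvInnerA_some hi
        simp only [List.getElem?_append_left hj, hq, List.eraseIdx_append_of_lt_length hj,
          Option.map_some]

theorem pvA_spec (hyp0 : List (Int × String)) :
    ∀ (i : Nat) (K ref : List (Int × String)) (wm₀ : List (Int × Int)), i ≤ hyp0.length →
      pvAGo ref (hyp0.take i ++ K) wm₀ i =
        (wm₀ ++ (pvSpecGo ref (hyp0.take i).reverse).1,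
         (pvSpecGo ref (hyp0.take i).reverse).2.1,
         (pvSpecGo ref (hyp0.take i).reverse).2.2.reverse ++ K) := by
  intro i
  induction i with
  | zero => intro K ref wm₀ _; simp [pvAGo, pvSpecGo]
  | succ i ih =>
    intro K ref wm₀ hi
    have hlt : i < hyp0.length := hi
    have htk : hyp0.take (i+1) = hyp0.take i ++ [hyp0[i]] := by
      rw [List.take_add_one]; simp [List.getElem?_eq_getElem hlt]
    have hlen : (hyp0.take i).length = i := List.length_take_of_le (le_of_lt hlt)
    set h := hyp0[i] with hh
    have hget : (hyp0.take i ++ ([h] ++ K))[i]? = some h := by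
      rw [List.getElem?_append_right (by omega)]
      simp [hlen]
    rw [htk, List.append_assoc, pvAGo, hget]
    rw [List.reverse_append, List.reverse_singleton]
    simp only [List.singleton_append]
    simp only [pvSpecGo]
    have hrlm := pvInnerA_rLM h.2 ref
    cases hin : pvInnerA h.2 ref ref.length with
    | none =>
      rw [hin] at hrlm; simp only at hrlm
      rw [hrlm, ih (h :: K) ref wm₀ (le_of_lt hlt)]
      simp
    | some j =>
      rw [hin] at hrlm
      obtain ⟨hj, q, hq, hqw⟩ := pvInnerA_some hin
      simp only at hrlm; rw [hq] at hrlm; simp only at hrlm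
      have herase : (hyp0.take i ++ (h :: K)).eraseIdx i = hyp0.take i ++ K := by
        rw [List.eraseIdx_append_of_length_le (by omega)]
        simp [hlen]
      rw [hrlm]
      simp only
      rw [hq]
      simp only
      rw [herase, ih K (ref.eraseIdx j) (wm₀ ++ [(q.1, h.1)]) (le_of_lt hlt)]
      simp

-- ---- B's dict-of-stacks loop computes pvSpecGo ----
theorem pvPosPairs_ge {w : String} {l : List (Int × String)} {j : Nat} {m : PySem.Set Nat}
    {q : Nat × Int} (h : q ∈ pvPosPairs w l j m) : j ≤ q.1 := by
  induction l generalizing j with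
  | nil => simp [pvPosPairs] at h
  | cons p t ih =>
    rw [pvPosPairs] at h
    rcases List.mem_append.1 h with h1 | h2
    · split at h1 <;> simp at h1
      simp [h1]
    · exact le_of_lt (lt_of_lt_of_le (Nat.lt_succ_self j) (ih h2))

theorem pvKeptRef_add_lt (l : List (Int × String)) {j j' : Nat} (m : PySem.Set Nat)
    (h : j' < j) : pvKeptRef l j (PySem.Set.add m j') = pvKeptRef l j m := by
  induction l generalizing j with
  | nil => rfl
  | cons p t ih =>
    simp [pvKeptRef, ih (show j' < j + 1 by omega), PySem.Set.mem_add,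
      (show j ≠ j' by omega)]

theorem pvRLM_keptRef (w : String) :
    ∀ (l : List (Int × String)) (j : Nat) (m : PySem.Set Nat),
      pvRLM w (pvKeptRef l j m) =
        (pvPosPairs w l j m).getLast?.map
          (fun q => (q.2, pvKeptRef l j (PySem.Set.add m q.1))) := by
  intro l
  induction l with
  | nil => intro j m; rfl
  | cons p t ih =>
    intro j m
    rw [pvKeptRef, pvPosPairs]
    by_cases hm : j ∈ m
    · rw [if_pos hm, if_neg (by simp [hm]), List.nil_append, List.nil_append, ih (j+1) m]
      cases hg : (pvPosPairs w t (j+1) m).getLast? with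
      | none => simp
      | some q =>
        simp only [Option.map_some]
        have hq1 : j + 1 ≤ q.1 := pvPosPairs_ge (List.mem_of_getLast? hg)
        simp [pvKeptRef, hm]
    · rw [if_neg hm, List.singleton_append, pvRLM, ih (j+1) m]
      cases hg : (pvPosPairs w t (j+1) m).getLast? with
      | none =>
        have hemp : pvPosPairs w t (j+1) m = [] := List.getLast?_eq_none_iff.mp hg
        rw [hemp, List.append_nil]
        simp only [Option.map_none]
        by_cases hp : p.2 = w
        · rw [if_pos hp, if_pos (⟨hm, hp⟩ : j ∉ m ∧ p.2 = w)]
          simp only [List.getLast?_singleton, Option.map_some]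
          simp only [pvKeptRef]
          have hjj : j ∈ PySem.Set.add m j := by simp [PySem.Set.mem_add]
          rw [if_pos hjj, List.nil_append, pvKeptRef_add_lt t m (Nat.lt_succ_self j)]
        · rw [if_neg hp, if_neg (by simp [hp])]
          rfl
      | some q =>
        have hq1 : j + 1 ≤ q.1 := pvPosPairs_ge (List.mem_of_getLast? hg)
        have hne : pvPosPairs w t (j+1) m ≠ [] := by
          intro hh; rw [hh] at hg; simp at hg
        rw [List.getLast?_append_of_ne_nil _ hne, hg]
        simp only [Option.map_some]
        simp only [pvKeptRef]
        have hjm : j ∉ PySem.Set.add m q.1 := by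
          simp only [PySem.Set.mem_add]
          rintro (h | h)
          · exact hm h
          · omega
        rw [if_neg hjm, List.singleton_append]

theorem pvPosPairs_add (w : String) :
    ∀ (l : List (Int × String)) (j : Nat) (m : PySem.Set Nat) (j' : Nat),
    pvPosPairs w l j (PySem.Set.add m j') =
      (pvPosPairs w l j m).filter (fun q => q.1 != j') := by
  intro l
  induction l with
  | nil => intro j m j'; rfl
  | cons p t ih =>
    intro j m j'
    rw [pvPosPairs, pvPosPairs, List.filter_append, ih (j+1) m j']
    congr 1
    by_cases hm : j ∈ m
    · rw [if_neg (by simp [hm]), if_neg (by simp [hm])]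
      rfl
    · by_cases hp : p.2 = w
      · by_cases hj : j = j'
        · rw [if_neg (by simp [PySem.Set.mem_add, hj]), if_pos ⟨hm, hp⟩]
          simp [hj]
        · rw [if_pos ⟨(by simp [PySem.Set.mem_add, hm, hj] : j ∉ PySem.Set.add m j'), hp⟩,
            if_pos ⟨hm, hp⟩]
          simp [hj]
      · rw [if_neg (by simp [hp]), if_neg (by simp [hp])]
        rfl

theorem pvPosPairs_pairwise (w : String) :
    ∀ (l : List (Int × String)) (j : Nat) (m : PySem.Set Nat),
    (pvPosPairs w l j m).Pairwise (fun a b => a.1 < b.1) := by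
  intro l
  induction l with
  | nil => intro j m; exact List.Pairwise.nil
  | cons p t ih =>
    intro j m
    rw [pvPosPairs]
    apply List.pairwise_append.mpr
    refine ⟨?_, ih (j+1) m, ?_⟩
    · split <;> simp
    · intro a ha b hb
      have hb1 := pvPosPairs_ge hb
      split at ha <;> simp at ha
      subst ha
      exact Nat.lt_of_succ_le hb1

theorem pvFilter_ne_getLast :
    ∀ {ps : List (Nat × Int)} {q : Nat × Int},
    ps.Pairwise (fun a b => a.1 < b.1) → ps.getLast? = some q →
    ps.filter (fun x => x.1 != q.1) = ps.dropLast := by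
  intro ps
  induction ps with
  | nil => intro q _ hq; simp at hq
  | cons a t ih =>
    intro q hp hq
    cases t with
    | nil =>
      simp at hq
      simp [List.filter, hq]
    | cons b u =>
      have hgl : (b :: u).getLast? = some q := by
        rw [← hq]; exact (List.getLast?_cons_cons ..).symm
      have hqmem : q ∈ b :: u := List.mem_of_getLast? hgl
      have halt : a.1 < q.1 := (List.pairwise_cons.mp hp).1 q hqmem
      rw [List.filter_cons_of_pos (by simp; omega)]
      rw [ih (List.pairwise_cons.mp hp).2 hgl]
      simp [List.dropLast_cons_of_ne_nil]

theorem pvPosPairs_disjoint {w w' : String} (hne : w' ≠ w) :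
    ∀ {l : List (Int × String)} {j : Nat} {m : PySem.Set Nat} {q : Nat × Int},
    q ∈ pvPosPairs w l j m → ∀ q' ∈ pvPosPairs w' l j m, q'.1 ≠ q.1 := by
  intro l
  induction l with
  | nil => intro j m q h; simp [pvPosPairs] at h
  | cons p t ih =>
    intro j m q h q' h'
    rw [pvPosPairs] at h h'
    rcases List.mem_append.1 h with h1 | h2 <;>
      rcases List.mem_append.1 h' with h1' | h2'
    · split at h1 <;> simp at h1
      split at h1' <;> simp at h1'
      rcases h1 with ⟨_, _⟩
      exfalso
      rename_i hc hc'
      exact hne (hc'.2.symm.trans hc.2)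
    · split at h1 <;> simp at h1
      subst h1
      have := pvPosPairs_ge h2'
      show q'.1 ≠ j
      omega
    · split at h1' <;> simp at h1'
      subst h1'
      have := pvPosPairs_ge h2
      show j ≠ q.1
      omega
    · exact ih h2 q' h2'

theorem pvBuildPos_getD (w : String) :
    ∀ (l : List (Int × String)) (j : Nat) (d : PySem.Dict String (List (Nat × Int))),
      (pvBuildPos l j d).getD w [] = d.getD w [] ++ pvPosPairs w l j PySem.Set.empty := by
  intro l
  induction l with
  | nil => intro j d; simp [pvBuildPos, pvPosPairs]
  | cons p t ih =>
    intro j d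
    rw [pvBuildPos, pvPosPairs, ih (j+1)]
    by_cases hw : w = p.2
    · subst hw
      rw [PySem.Dict.getD_insert_self]
      simp [PySem.Set.empty]
    · rw [PySem.Dict.getD_insert_of_ne _ _ _ hw]
      simp [Ne.symm hw]

theorem pvKeptRef_empty : ∀ (l : List (Int × String)) (j : Nat),
    pvKeptRef l j PySem.Set.empty = l := by
  intro l
  induction l with
  | nil => intro j; rfl
  | cons p t ih =>
    intro j
    rw [pvKeptRef, ih (j+1)]
    simp [PySem.Set.empty]

theorem pvB_spec (hyp0 l : List (Int × String)) :
    ∀ (i : Nat) (pos : PySem.Dict String (List (Nat × Int))) (m : PySem.Set Nat)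
      (wm₀ : List (Int × Int)) (kept : List (Int × String)),
      i ≤ hyp0.length →
      (∀ w, pos.getD w [] = pvPosPairs w l 0 m) →
      ∃ m', pvBGo hyp0 i pos m wm₀ kept =
              (m', wm₀ ++ (pvSpecGo (pvKeptRef l 0 m) (hyp0.take i).reverse).1,
               kept ++ (pvSpecGo (pvKeptRef l 0 m) (hyp0.take i).reverse).2.2) ∧
            pvKeptRef l 0 m' = (pvSpecGo (pvKeptRef l 0 m) (hyp0.take i).reverse).2.1 := by
  intro i
  induction i with
  | zero =>
    intro pos m wm₀ kept _ _
    exact ⟨m, by simp [pvBGo, pvSpecGo], by simp [pvSpecGo]⟩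
  | succ i ih =>
    intro pos m wm₀ kept hi hpos
    have hlt : i < hyp0.length := hi
    have htk : hyp0.take (i+1) = hyp0.take i ++ [hyp0[i]] := by
      rw [List.take_add_one]; simp [List.getElem?_eq_getElem hlt]
    set h := hyp0[i] with hh
    have hget : hyp0[i]? = some h := List.getElem?_eq_getElem hlt
    rw [pvBGo, hget]
    rw [htk, List.reverse_append, List.reverse_singleton]
    simp only [List.singleton_append]
    simp only [pvSpecGo]
    have hrlm := pvRLM_keptRef h.2 l 0 m
    rw [hpos h.2]
    cases hst : pvPosPairs h.2 l 0 m with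
    | nil =>
      rw [hst] at hrlm
      simp only [List.getLast?_nil, Option.map_none] at hrlm
      rw [hrlm]
      obtain ⟨m', h1, h2⟩ := ih pos m wm₀ (kept ++ [h]) (le_of_lt hlt) hpos
      refine ⟨m', ?_, h2⟩
      rw [h1]
      simp
    | cons q qs =>
      rw [hst] at hrlm
      have hne : (q :: qs : List (Nat × Int)) ≠ [] := by simp
      set top := (q :: qs).getLast hne with htop
      have hgl : (q :: qs).getLast? = some top := List.getLast?_eq_some_getLast ..
      rw [hgl, Option.map_some] at hrlm
      rw [hrlm]
      simp only
      -- invariant for the updated dict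
      have hpos' : ∀ w, (pos.insert h.2 (q :: qs).dropLast).getD w [] =
          pvPosPairs w l 0 (PySem.Set.add m top.1) := by
        intro w
        by_cases hw : w = h.2
        · rw [hw, PySem.Dict.getD_insert_self, pvPosPairs_add h.2 l 0 m top.1, hst]
          have hpw := pvPosPairs_pairwise h.2 l 0 m
          rw [hst] at hpw
          exact (pvFilter_ne_getLast hpw hgl).symm
        · rw [PySem.Dict.getD_insert_of_ne _ _ _ hw, hpos w, pvPosPairs_add w l 0 m top.1]
          have htopmem : top ∈ pvPosPairs h.2 l 0 m := by
            rw [hst]; exact List.getLast_mem hne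
          have := pvPosPairs_disjoint hw htopmem
          rw [List.filter_eq_self.mpr]
          intro a ha
          simp [this a ha]
      obtain ⟨m', h1, h2⟩ := ih (pos.insert h.2 (q :: qs).dropLast) (PySem.Set.add m top.1)
        (wm₀ ++ [(top.2, h.1)]) kept (le_of_lt hlt) hpos'
      refine ⟨m', ?_, by rw [h2]⟩
      rw [h1]
      simp

theorem match_enums_eq (ref hyp : List (Int × String)) :
    match_enums_py ref hyp = match_enums_py_alt ref hyp := by
  unfold match_enums_py match_enums_py_alt
  have hA := pvA_spec hyp hyp.length [] ref [] (le_refl _)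
  rw [List.append_nil, List.take_length] at hA
  rw [hA]
  have hpos : ∀ w, (pvBuildPos ref 0 PySem.Dict.empty).getD w [] =
      pvPosPairs w ref 0 PySem.Set.empty := by
    intro w
    rw [pvBuildPos_getD w ref 0 PySem.Dict.empty]
    simp [PySem.Dict.getD_empty]
  obtain ⟨m', h1, h2⟩ := pvB_spec hyp ref hyp.length (pvBuildPos ref 0 PySem.Dict.empty)
    PySem.Set.empty [] [] (le_refl _) hpos
  rw [List.take_length, pvKeptRef_empty ref 0] at h1 h2
  simp only [h1, List.nil_append]
  rw [h2]
  simp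

-- ===== VERDICT (by name: the statement is the Claim_ definition above) =====
theorem match_enums_py_spec : Claim_equal_match_enums_py := by
  intro ref hyp _
  exact match_enums_eq ref hyp
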